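-- pv_equiv track=rewrite | github.com/pokerdio/generic | euler/euler-219.py | go
-- ===== SOURCE A (Python) =====
-- def stepn(x, n, v):
--     v[x] -= n
--     if v[x] <= 0:
--         v.pop(x)
--
--     v[x + 1] = v.get(x + 1, 0) + n
--     v[x + 4] = v.get(x + 4, 0) + n
--
-- def go(n):
--     v = {1: 1, 4: 1}
--     n -= 2
--     while n > 0:
--         x = min(v.keys())
--         count = v[x]
--         if count > n:
--             count = n
--
--         n -= count
--         stepn(x, count, v)
--
--     return sum(i * v[i] for i in v.keys())
-- ===== SOURCE B (Python) =====
-- def go(n):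
--     # Counting instead of simulation: a split of a node at cost level c creates
--     # children at c+1 and c+4, so the number of nodes ever reaching level c (when
--     # all cheaper levels are fully split) obeys cnt(c) = cnt(c-1) + cnt(c-4),
--     # cnt(0) = 1.  A code with n leaves needs s = n - 2 splits beyond the root;
--     # the greedy consumes levels in increasing order, so sweep levels, spending
--     # the split budget level by level, and close the last (partial) level in
--     # one arithmetic step: each split at level c adds c + 5 to the leaf-cost sum.
--     s = n - 2
--     if s <= 0:
--         return 5
--     p, q, r, t = 0, 0, 0, 1   # cnt(c-4), cnt(c-3), cnt(c-2), cnt(c-1)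
--     total, c = 5, 1
--     while True:
--         cur = t + p           # cnt(c)
--         if s <= cur:
--             return total + s * (c + 5)
--         total += cur * (c + 5)
--         s -= cur
--         p, q, r, t = q, r, t, cur
--         c += 1
-- ===== Notes on version B (the rewrite author's own statement) =====
-- stated objective: alternative
-- what changed: B does not simulate the multiset of pending codeword costs at all: it counts how many splits each cost level ever receives via the recurrence cnt(c)=cnt(c-1)+cnt(c-4), sweeps levels spending the split budget n-2 against these counts while accumulating the cost total arithmetically (each split at level c adds c+5), and closes the final partial level with one multiplication, instead of A's dict of live costs with repeated min(v.keys()) extraction and token transfers.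
import Mathlib
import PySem

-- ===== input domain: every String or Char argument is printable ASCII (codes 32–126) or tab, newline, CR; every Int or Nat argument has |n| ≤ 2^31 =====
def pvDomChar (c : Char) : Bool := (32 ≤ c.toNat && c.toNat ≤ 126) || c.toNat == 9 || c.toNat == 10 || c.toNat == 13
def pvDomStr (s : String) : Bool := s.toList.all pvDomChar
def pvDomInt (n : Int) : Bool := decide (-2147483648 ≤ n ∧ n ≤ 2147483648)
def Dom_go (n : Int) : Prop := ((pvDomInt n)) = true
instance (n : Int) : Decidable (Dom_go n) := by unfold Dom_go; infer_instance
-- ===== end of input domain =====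

-- B replaces A's multiset simulation (dict of live costs + repeated min(v.keys()))
-- by counting splits per cost level with the recurrence cnt(c)=cnt(c-1)+cnt(c-4)
-- and accumulating the answer arithmetically (objective: alternative).

-- ===== PORT A =====
-- stepn(x, n, v): v[x] -= n; pop x if <= 0; v[x+1] += n; v[x+4] += n.
-- `v[x] -= n` is ported with getD 0: exact here because x is a key of v at every call site.
def stepnA (x m : Int) (v : PySem.Dict Int Int) : PySem.Dict Int Int :=
  let v1 := v.insert x (v.getD x 0 - m)
  let v2 := if v1.getD x 0 ≤ 0 then v1.erase x else v1
  let v3 := v2.insert (x + 1) (v2.getD (x + 1) 0 + m)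
  v3.insert (x + 4) (v3.getD (x + 4) 0 + m)

-- A's while loop; fuel = n.toNat suffices since each iteration lowers n by count ≥ 1
def aloop : Nat → Int → PySem.Dict Int Int → PySem.Dict Int Int
  | 0, _, v => v
  | f + 1, n, v =>
    if n > 0 then
      match PySem.List.min? v.keys (fun x => x) with
      | none => v  -- unreachable: Python's min() would raise on an empty dict; v is never empty
      | some x =>
        let count := v.getD x 0      -- v[x]; x = min(v.keys()) is always a key of v
        let count := if count > n then n else count
        aloop f (n - count) (stepnA x count v)
    else v

def go (n : Int) : Int :=
  let v : PySem.Dict Int Int := PySem.Dict.ofList [(1, 1), (4, 1)]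
  let m := n - 2
  let v := aloop m.toNat m v
  (v.keys.map (fun i => i * v.getD i 0)).sum   -- v[i] exact as getD: i ranges over v's keys

-- ===== PORT B =====
-- Source B's `while True` loop; fuel = s.toNat suffices since each iteration lowers s by cur ≥ 1
def bstep : Nat → Int → Int → Int → Int → Int → Int → Int → Int
  | 0, _, _, _, _, _, _, _ => 0  -- unreachable under the fuel bound
  | f + 1, s, c, p, q, r, t, total =>
    let cur := t + p
    if s ≤ cur then total + s * (c + 5)
    else bstep f (s - cur) (c + 1) q r t cur (total + cur * (c + 5))

def go_alt (n : Int) : Int :=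
  let s := n - 2
  if s ≤ 0 then 5 else bstep s.toNat s 1 0 0 0 1 5

-- ===== PRECONDITION & SPEC =====
def Spec_go (n : Int) (out : Int) : Prop := out = go_alt n
instance (n : Int) (out : Int) : Decidable (Spec_go n out) := by unfold Spec_go; infer_instance

-- ===== CLAIM (what is proved, stated in full; the proofs are below) =====
def Claim_equal_go : Prop := ∀ (n : Int), Dom_go n → Spec_go n (go n)

-- ===== LEMMAS AND PROOFS =====

-- the 4-entry dict shape A's loop keeps from level 4 on: keys c, c+1, c+2, c+3 in order
def mkd (c a b d e : Int) : PySem.Dict Int Int :=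
  PySem.Dict.mk [(c, a), (c + 1, b), (c + 2, d), (c + 3, e)]

-- A's final sum as a function
def sumv (v : PySem.Dict Int Int) : Int := (v.keys.map (fun i => i * v.getD i 0)).sum

-- common reference recursion both loops compute
def ref : Nat → Int → Int → Int → Int → Int → Int → Int
  | 0, _, _, _, _, _, _ => 0
  | f + 1, s, c, a, b, d, e =>
    if s ≤ a then c * a + (c + 1) * b + (c + 2) * d + (c + 3) * e + (c + 5) * s
    else ref f (s - a) (c + 1) (b + a) d e a

theorem aloop_nonpos (f : Nat) (s : Int) (v : PySem.Dict Int Int) (hs : s ≤ 0) :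
    aloop f s v = v := by
  cases f with
  | zero => rfl
  | succ f => rw [aloop, if_neg (by omega)]

theorem min_keys_mkd (c a b d e : Int) :
    PySem.List.min? (mkd c a b d e).keys (fun x => x) = some c := by
  simp [mkd, PySem.Dict.keys, PySem.List.min?, List.foldl,
    show ¬ c + 1 < c by omega, show ¬ c + 2 < c by omega, show ¬ c + 3 < c by omega]

theorem getD_mkd_head (c a b d e : Int) : (mkd c a b d e).getD c 0 = a := by
  simp [mkd, PySem.Dict.getD, PySem.Dict.get?, List.find?]

theorem stepnA_full (c a b d e : Int) :
    stepnA c a (mkd c a b d e) = mkd (c + 1) (b + a) d e a := by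
  simp [stepnA, mkd, PySem.Dict.insert, PySem.Dict.erase, PySem.Dict.contains,
    PySem.Dict.getD, PySem.Dict.get?, List.find?, List.filter,
    show ((c + 1 : Int) == c) = false from beq_eq_false_iff_ne.mpr (by omega),
    show ((c + 2 : Int) == c) = false from beq_eq_false_iff_ne.mpr (by omega),
    show ((c + 3 : Int) == c) = false from beq_eq_false_iff_ne.mpr (by omega),
    show ((c : Int) == c + 1) = false from beq_eq_false_iff_ne.mpr (by omega),
    show ((c + 2 : Int) == c + 1) = false from beq_eq_false_iff_ne.mpr (by omega),
    show ((c + 3 : Int) == c + 1) = false from beq_eq_false_iff_ne.mpr (by omega),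
    show ((c + 1 : Int) == c + 4) = false from beq_eq_false_iff_ne.mpr (by omega),
    show ((c + 2 : Int) == c + 4) = false from beq_eq_false_iff_ne.mpr (by omega),
    show ((c + 3 : Int) == c + 4) = false from beq_eq_false_iff_ne.mpr (by omega)]
  omega

theorem stepnA_partial (c a b d e s : Int) (h : s < a) :
    stepnA c s (mkd c a b d e) =
      PySem.Dict.mk [(c, a - s), (c + 1, b + s), (c + 2, d), (c + 3, e), (c + 4, s)] := by
  simp [stepnA, mkd, PySem.Dict.insert, PySem.Dict.erase, PySem.Dict.contains,
    PySem.Dict.getD, PySem.Dict.get?, List.find?, List.filter,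
    show ¬ a - s ≤ 0 by omega,
    show ((c + 1 : Int) == c) = false from beq_eq_false_iff_ne.mpr (by omega),
    show ((c + 2 : Int) == c) = false from beq_eq_false_iff_ne.mpr (by omega),
    show ((c + 3 : Int) == c) = false from beq_eq_false_iff_ne.mpr (by omega),
    show ((c : Int) == c + 1) = false from beq_eq_false_iff_ne.mpr (by omega),
    show ((c + 2 : Int) == c + 1) = false from beq_eq_false_iff_ne.mpr (by omega),
    show ((c + 3 : Int) == c + 1) = false from beq_eq_false_iff_ne.mpr (by omega),
    show ((c : Int) == c + 4) = false from beq_eq_false_iff_ne.mpr (by omega),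
    show ((c + 1 : Int) == c + 4) = false from beq_eq_false_iff_ne.mpr (by omega),
    show ((c + 2 : Int) == c + 4) = false from beq_eq_false_iff_ne.mpr (by omega),
    show ((c + 3 : Int) == c + 4) = false from beq_eq_false_iff_ne.mpr (by omega)]

theorem sumv_mkd (c a b d e : Int) :
    sumv (mkd c a b d e) = c * a + (c + 1) * b + (c + 2) * d + (c + 3) * e := by
  simp [sumv, mkd, PySem.Dict.keys, PySem.Dict.getD, PySem.Dict.get?, List.find?,
    show ((c + 1 : Int) == c) = false from beq_eq_false_iff_ne.mpr (by omega),
    show ((c + 2 : Int) == c) = false from beq_eq_false_iff_ne.mpr (by omega),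
    show ((c + 3 : Int) == c) = false from beq_eq_false_iff_ne.mpr (by omega),
    show ((c : Int) == c + 1) = false from beq_eq_false_iff_ne.mpr (by omega),
    show ((c + 2 : Int) == c + 1) = false from beq_eq_false_iff_ne.mpr (by omega),
    show ((c : Int) == c + 2) = false from beq_eq_false_iff_ne.mpr (by omega),
    show ((c + 1 : Int) == c + 2) = false from beq_eq_false_iff_ne.mpr (by omega),
    show ((c + 3 : Int) == c + 2) = false from beq_eq_false_iff_ne.mpr (by omega),
    show ((c : Int) == c + 3) = false from beq_eq_false_iff_ne.mpr (by omega),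
    show ((c + 1 : Int) == c + 3) = false from beq_eq_false_iff_ne.mpr (by omega),
    show ((c + 2 : Int) == c + 3) = false from beq_eq_false_iff_ne.mpr (by omega)]
  ring

theorem sumv_partial (c a b d e s : Int) :
    sumv (PySem.Dict.mk [(c, a - s), (c + 1, b + s), (c + 2, d), (c + 3, e), (c + 4, s)]) =
      c * a + (c + 1) * b + (c + 2) * d + (c + 3) * e + (c + 5) * s := by
  simp [sumv, PySem.Dict.keys, PySem.Dict.getD, PySem.Dict.get?, List.find?,
    show ((c : Int) == c + 1) = false from beq_eq_false_iff_ne.mpr (by omega),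
    show ((c : Int) == c + 2) = false from beq_eq_false_iff_ne.mpr (by omega),
    show ((c : Int) == c + 3) = false from beq_eq_false_iff_ne.mpr (by omega),
    show ((c : Int) == c + 4) = false from beq_eq_false_iff_ne.mpr (by omega),
    show ((c + 1 : Int) == c + 2) = false from beq_eq_false_iff_ne.mpr (by omega),
    show ((c + 1 : Int) == c + 3) = false from beq_eq_false_iff_ne.mpr (by omega),
    show ((c + 1 : Int) == c + 4) = false from beq_eq_false_iff_ne.mpr (by omega),
    show ((c + 2 : Int) == c + 3) = false from beq_eq_false_iff_ne.mpr (by omega),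
    show ((c + 2 : Int) == c + 4) = false from beq_eq_false_iff_ne.mpr (by omega),
    show ((c + 3 : Int) == c + 4) = false from beq_eq_false_iff_ne.mpr (by omega)]
  ring

-- A's loop on the 4-entry shape computes ref
theorem aloop_eq_ref (f : Nat) :
    ∀ s c a b d e : Int, 1 ≤ s → s.toNat ≤ f → 1 ≤ a → 0 ≤ b → 0 ≤ d → 0 ≤ e →
      sumv (aloop f s (mkd c a b d e)) = ref f s c a b d e := by
  induction f with
  | zero => intro s c a b d e hs hf ha hb hd he; omega
  | succ f IH =>
    intro s c a b d e hs hf ha hb hd he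
    rw [aloop, if_pos (by omega), min_keys_mkd]
    simp only [getD_mkd_head]
    by_cases hgt : a > s
    · rw [if_pos hgt, stepnA_partial c a b d e s (by omega),
        aloop_nonpos f (s - s) _ (by omega), sumv_partial, ref, if_pos (by omega)]
    · rw [if_neg hgt, stepnA_full]
      by_cases heq : s = a
      · rw [aloop_nonpos f (s - a) _ (by omega), sumv_mkd, ref, if_pos (by omega)]
        subst heq; ring
      · rw [IH (s - a) (c + 1) (b + a) d e a (by omega) (by omega) (by omega)
          (by omega) (by omega) (by omega), ref, if_neg (by omega)]

-- B's loop computes ref (a = t + p and total = current window's cost sum)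
theorem bstep_eq_ref (f : Nat) :
    ∀ s c p q r t a total : Int, a = t + p →
      total = c * a + (c + 1) * q + (c + 2) * r + (c + 3) * t →
      bstep f s c p q r t total = ref f s c a q r t := by
  induction f with
  | zero => intro _ _ _ _ _ _ _ _ _ _; rfl
  | succ f IH =>
    intro s c p q r t a total ha htot
    rw [bstep, ref]
    simp only [← ha]
    by_cases hle : s ≤ a
    · rw [if_pos hle, if_pos hle, htot]; ring
    · rw [if_neg hle, if_neg hle,
        IH (s - a) (c + 1) q r t a (q + a) (total + a * (c + 5)) (by omega) (by subst ha htot; ring)]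

-- three concrete first iterations of A (levels 1, 2, 3 each hold a single token)
theorem aloop_first3 (f : Nat) (s : Int) (hs : 4 ≤ s) :
    aloop (f + 3) s (PySem.Dict.ofList [(1, 1), (4, 1)]) = aloop f (s - 3) (mkd 4 2 1 1 1) := by
  rw [aloop, if_pos (by omega),
    show PySem.List.min? (PySem.Dict.ofList [((1 : Int), (1 : Int)), (4, 1)]).keys (fun x => x)
      = some 1 from by decide]
  simp only [show (PySem.Dict.ofList [((1 : Int), (1 : Int)), (4, 1)]).getD 1 0 = 1 from by decide]
  rw [if_neg (by omega),
    show stepnA 1 1 (PySem.Dict.ofList [((1 : Int), (1 : Int)), (4, 1)])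
      = PySem.Dict.mk [(4, 1), (2, 1), (5, 1)] from by decide]
  rw [aloop, if_pos (by omega),
    show PySem.List.min? (PySem.Dict.mk [((4 : Int), (1 : Int)), (2, 1), (5, 1)]).keys (fun x => x)
      = some 2 from by decide]
  simp only [show (PySem.Dict.mk [((4 : Int), (1 : Int)), (2, 1), (5, 1)]).getD 2 0 = 1 from by decide]
  rw [if_neg (by omega),
    show stepnA 2 1 (PySem.Dict.mk [((4 : Int), (1 : Int)), (2, 1), (5, 1)])
      = PySem.Dict.mk [(4, 1), (5, 1), (3, 1), (6, 1)] from by decide]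
  rw [aloop, if_pos (by omega),
    show PySem.List.min? (PySem.Dict.mk [((4 : Int), (1 : Int)), (5, 1), (3, 1), (6, 1)]).keys (fun x => x)
      = some 3 from by decide]
  simp only [show (PySem.Dict.mk [((4 : Int), (1 : Int)), (5, 1), (3, 1), (6, 1)]).getD 3 0 = 1 from by decide]
  rw [if_neg (by omega),
    show stepnA 3 1 (PySem.Dict.mk [((4 : Int), (1 : Int)), (5, 1), (3, 1), (6, 1)])
      = mkd 4 2 1 1 1 from by decide]
  congr 1
  omega

-- the matching three first unfoldings of ref
theorem ref_first3 (f : Nat) (s : Int) (hs : 4 ≤ s) :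
    ref (f + 3) s 1 1 0 0 1 = ref f (s - 3) 4 2 1 1 1 := by
  rw [ref, if_neg (by omega), ref, if_neg (by omega), ref, if_neg (by omega)]
  norm_num
  congr 1 <;> omega

-- ===== VERDICT (by name: the statement is the Claim_ definition above) =====
theorem go_spec : Claim_equal_go := by
  unfold Claim_equal_go Spec_go
  intro n _
  by_cases hle : n - 2 ≤ 0
  · show sumv (aloop (n - 2).toNat (n - 2) (PySem.Dict.ofList [(1, 1), (4, 1)]))
      = if n - 2 ≤ 0 then 5 else bstep (n - 2).toNat (n - 2) 1 0 0 0 1 5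
    rw [if_pos hle, show (n - 2).toNat = 0 from by omega, aloop_nonpos 0 (n - 2) _ hle]
    decide
  · by_cases hsm : n ≤ 5
    · have h3 : 3 ≤ n := by omega
      interval_cases n <;> decide
    · show sumv (aloop (n - 2).toNat (n - 2) (PySem.Dict.ofList [(1, 1), (4, 1)]))
        = if n - 2 ≤ 0 then 5 else bstep (n - 2).toNat (n - 2) 1 0 0 0 1 5
      rw [if_neg hle,
        bstep_eq_ref (n - 2).toNat (n - 2) 1 0 0 0 1 1 5 (by omega) (by ring),
        show (n - 2).toNat = (n - 5).toNat + 3 from by omega,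
        aloop_first3 (n - 5).toNat (n - 2) (by omega),
        ref_first3 (n - 5).toNat (n - 2) (by omega),
        show n - 2 - 3 = n - 5 from by omega,
        aloop_eq_ref (n - 5).toNat (n - 5) 4 2 1 1 1 (by omega) (by omega) (by omega)
          (by omega) (by omega) (by omega)]
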